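-- pv_equiv track=rewrite | github.com/DAIMoNDLab/tud-sumo | tud_sumo/_traffic_signals.py | _get_phase_string
-- ===== SOURCE A (Python) =====
-- def _get_phase_string(curr_phases, masks):
--
--     m_len = len(list(masks.values())[0])
--     phase_arr = ['-'] * m_len
--
--     for m_key in masks.keys():
--         for idx in range(m_len):
--             if masks[m_key][idx] == "1":
--                 phase_arr[idx] = curr_phases[m_key]
--
--     phase_str = "".join(phase_arr)
--     return phase_str
-- ===== SOURCE B (Python) =====
-- def _resolve(curr_phases, rev_items, idx):
--     for key, mask in rev_items:
--         if mask[idx] == "1":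
--             return curr_phases[key]
--     return "-"
--
-- def _get_phase_string(curr_phases, masks):
--     items = list(masks.items())
--     m_len = len(items[0][1])
--     rev_items = items[::-1]
--     return "".join(_resolve(curr_phases, rev_items, idx) for idx in range(m_len))
-- ===== Notes on version B (the rewrite author's own statement) =====
-- stated objective: alternative
-- what changed: B resolves each output column independently: it walks the (key, mask) items in reverse insertion order and returns at the first mask with a '1' in that column ('-' if none), via a recursive helper, instead of A's mutable overlay array that every key's loop overwrites in forward order.
import Mathlib
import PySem

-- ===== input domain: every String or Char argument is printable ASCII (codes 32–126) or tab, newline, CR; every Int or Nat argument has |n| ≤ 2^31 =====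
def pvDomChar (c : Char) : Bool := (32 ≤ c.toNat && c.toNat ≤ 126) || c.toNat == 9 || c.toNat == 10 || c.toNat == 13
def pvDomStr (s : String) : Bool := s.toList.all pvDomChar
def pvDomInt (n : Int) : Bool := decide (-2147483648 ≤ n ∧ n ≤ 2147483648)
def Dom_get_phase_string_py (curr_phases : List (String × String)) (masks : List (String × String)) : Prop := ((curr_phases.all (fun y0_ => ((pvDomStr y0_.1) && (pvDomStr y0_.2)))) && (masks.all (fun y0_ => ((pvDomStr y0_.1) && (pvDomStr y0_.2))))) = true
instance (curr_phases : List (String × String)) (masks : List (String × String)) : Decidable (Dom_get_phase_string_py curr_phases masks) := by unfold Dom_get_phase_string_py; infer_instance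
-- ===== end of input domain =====

-- B resolves each output column independently by a recursive first-match scan over the (key, mask)
-- items in reverse insertion order (early return, '-' if none), instead of A's mutable overlay
-- array that every key's forward loop overwrites; same return value.

-- ===== PORT A =====
def get_phase_string_py (curr_phases : List (String × String)) (masks : List (String × String)) : String :=
  let cd := PySem.Dict.ofList curr_phases
  let md := PySem.Dict.ofList masks
  match PySem.List.pyGet? md.values 0 with
  | none => ""   -- Python raises IndexError on list(masks.values())[0]; excluded by Pre_
  | some v0 =>
    let m_len := PySem.Str.len v0
    let phase_arr0 := List.replicate m_len.toNat "-"
    let phase_arr := md.keys.foldl (fun arr m_key =>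
      (PySem.List.pyRange 0 m_len 1).foldl (fun arr idx =>
        if PySem.Str.pyGet? (md.getD m_key "") idx == some '1' then
          arr.set idx.toNat (cd.getD m_key "")   -- curr_phases[m_key]; KeyError excluded by Pre_
        else arr) arr) phase_arr0
    PySem.Str.join "" phase_arr

-- ===== PORT B =====
-- helper '_resolve': 'for key, mask in rev_items: if mask[idx] == "1": return curr_phases[key]; return "-"'
def pvResolve (cd : PySem.Dict String String) (rev_items : List (String × String)) (idx : Int) : String :=
  match rev_items with
  | [] => "-"
  | (key, mask) :: rest =>
    if PySem.Str.pyGet? mask idx == some '1' then cd.getD key ""   -- curr_phases[key]; KeyError excluded by Pre_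
    else pvResolve cd rest idx

-- the generator expression '(_resolve(curr_phases, rev_items, idx) for idx in range(m_len))'
def pvCols (cd : PySem.Dict String String) (rev_items : List (String × String)) (idxs : List Int) : List String :=
  match idxs with
  | [] => []
  | i :: rest => pvResolve cd rev_items i :: pvCols cd rev_items rest

def get_phase_string_py_alt (curr_phases : List (String × String)) (masks : List (String × String)) : String :=
  match (PySem.Dict.ofList masks).items with
  | [] => ""   -- Python raises IndexError on items[0]; excluded by Pre_
  | (k0, m0) :: rest =>
    PySem.Str.join ""
      (pvCols (PySem.Dict.ofList curr_phases) (((k0, m0) :: rest).reverse)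
        (PySem.List.pyRange 0 (PySem.Str.len m0) 1))

-- ===== PRECONDITION & SPEC =====
-- Pre_ excludes exactly the inputs on which the Python A raises: an empty masks dict (IndexError on
-- list(masks.values())[0]), a mask value shorter than the first one (IndexError on masks[m_key][idx]),
-- and a mask with a '1' in the scanned columns whose key is missing from curr_phases (KeyError).
def Pre_get_phase_string_py (curr_phases : List (String × String)) (masks : List (String × String)) : Prop :=
  masks ≠ [] ∧
  (∀ v ∈ (PySem.Dict.ofList masks).values,
      PySem.Str.len ((PySem.Dict.ofList masks).values.headD "") ≤ PySem.Str.len v) ∧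
  (∀ p ∈ (PySem.Dict.ofList masks).items,
      '1' ∈ p.2.toList.take (PySem.Str.len ((PySem.Dict.ofList masks).values.headD "")).toNat →
      (PySem.Dict.ofList curr_phases).contains p.1 = true)
instance (curr_phases : List (String × String)) (masks : List (String × String)) : Decidable (Pre_get_phase_string_py curr_phases masks) := by unfold Pre_get_phase_string_py; infer_instance

def pvWitness_get_phase_string_py : (List (String × String)) × (List (String × String)) :=
  ([("a", "G"), ("b", "r")], [("a", "10"), ("b", "01")])

def Spec_get_phase_string_py (curr_phases : List (String × String)) (masks : List (String × String)) (out : String) : Prop := out = get_phase_string_py_alt curr_phases masks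
instance (curr_phases : List (String × String)) (masks : List (String × String)) (out : String) : Decidable (Spec_get_phase_string_py curr_phases masks out) := by unfold Spec_get_phase_string_py; infer_instance

-- ===== CLAIM (what is proved, stated in full; the proofs are below) =====
def Claim_equal_get_phase_string_py : Prop := ∀ (curr_phases : List (String × String)) (masks : List (String × String)), Dom_get_phase_string_py curr_phases masks → Pre_get_phase_string_py curr_phases masks → Spec_get_phase_string_py curr_phases masks (get_phase_string_py curr_phases masks)

-- ===== LEMMAS AND PROOFS =====

-- The length of the array is unchanged by A's inner column-overwrite loop.
lemma pv_len_inner {α : Type} (c : Nat → Bool) (v : α) (n : Nat) (arr : List α) :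
    ((List.range n).foldl (fun a i => if c i then a.set i v else a) arr).length = arr.length := by
  induction n generalizing arr with
  | zero => simp
  | succ m ih =>
    rw [List.range_succ, List.foldl_append]
    simp only [List.foldl_cons, List.foldl_nil]
    split <;> simp [ih]

-- Pointwise effect of A's inner loop over one key: column j becomes v iff j < n and the mask bit is set.
lemma pv_inner {α : Type} (c : Nat → Bool) (v : α) (n : Nat) (arr : List α)
    (h : n ≤ arr.length) (j : Nat) :
    ((List.range n).foldl (fun a i => if c i then a.set i v else a) arr)[j]?
      = if j < n ∧ c j = true then some v else arr[j]? := by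
  induction n generalizing arr with
  | zero => simp
  | succ m ih =>
    rw [List.range_succ, List.foldl_append]
    simp only [List.foldl_cons, List.foldl_nil]
    have hm : m ≤ arr.length := Nat.le_of_succ_le h
    have hlen := pv_len_inner c v m arr
    by_cases hc : c m = true
    · rw [if_pos hc, List.getElem?_set, hlen, ih arr hm]
      by_cases hj : m = j
      · subst hj
        have hml : m < arr.length := h
        simp [hml, hc]
      · rw [if_neg hj]
        by_cases h1 : c j = true
        · have hiff : (j < m ∧ c j = true) ↔ (j < m + 1 ∧ c j = true) := by
            constructor
            · rintro ⟨h2, h3⟩; exact ⟨Nat.lt_succ_of_lt h2, h3⟩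
            · rintro ⟨h2, h3⟩
              refine ⟨?_, h3⟩
              rcases Nat.lt_succ_iff_lt_or_eq.mp h2 with h4 | h4
              · exact h4
              · exact absurd h4.symm hj
          rw [if_congr hiff rfl rfl]
        · simp [h1]
    · rw [if_neg hc, ih arr hm]
      by_cases h1 : c j = true
      · by_cases hj : j = m
        · subst hj; exact absurd h1 hc
        · have hiff : (j < m ∧ c j = true) ↔ (j < m + 1 ∧ c j = true) := by
            constructor
            · rintro ⟨h2, h3⟩; exact ⟨Nat.lt_succ_of_lt h2, h3⟩
            · rintro ⟨h2, h3⟩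
              refine ⟨?_, h3⟩
              rcases Nat.lt_succ_iff_lt_or_eq.mp h2 with h4 | h4
              · exact h4
              · exact absurd h4 hj
          rw [if_congr hiff rfl rfl]
      · simp [h1]

-- The outer key loop preserves the array length as well.
lemma pv_len_outer {α : Type} (cond : String → Nat → Bool) (val : String → α) (n : Nat)
    (ks : List String) (arr : List α) :
    (ks.foldl (fun a k => (List.range n).foldl
        (fun a i => if cond k i then a.set i (val k) else a) a) arr).length = arr.length := by
  induction ks generalizing arr with
  | nil => rfl
  | cons k ks ih => simp only [List.foldl_cons]; rw [ih, pv_len_inner]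

-- A's overlay over all keys resolves column j to the value of the LAST key whose mask bit j is set,
-- i.e. the FIRST match in the reversed key list.
lemma pv_outer {α : Type} (cond : String → Nat → Bool) (val : String → α) (n : Nat)
    (ks : List String) (arr : List α) (hlen : n ≤ arr.length) (j : Nat) (hj : j < n) :
    (ks.foldl (fun a k => (List.range n).foldl
        (fun a i => if cond k i then a.set i (val k) else a) a) arr)[j]?
      = match ks.reverse.find? (fun k => cond k j) with
        | some k => some (val k)
        | none => arr[j]? := by
  induction ks using List.reverseRecOn with
  | nil => simp
  | append_singleton ks k ih =>
    rw [List.foldl_append]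
    simp only [List.foldl_cons, List.foldl_nil]
    have hl : n ≤ (ks.foldl (fun a k => (List.range n).foldl
        (fun a i => if cond k i then a.set i (val k) else a) a) arr).length := by
      rw [pv_len_outer]; exact hlen
    rw [pv_inner (cond k) (val k) n _ hl j, List.reverse_append]
    simp only [List.reverse_cons, List.reverse_nil, List.nil_append, List.singleton_append,
      List.find?_cons]
    by_cases hc : cond k j = true
    · simp [hc, hj]
    · have hcf : cond k j = false := by simpa using hc
      rw [ih]
      simp [hcf]

-- B's generator is a map over the index list.
lemma pvCols_eq_map (cd : PySem.Dict String String) (rev_items : List (String × String))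
    (idxs : List Int) : pvCols cd rev_items idxs = idxs.map (pvResolve cd rev_items) := by
  induction idxs with
  | nil => rfl
  | cons i rest ih => simp [pvCols, ih]

-- B's early-returning scan is the first match in the reversed item list.
lemma pvResolve_eq_find (cd : PySem.Dict String String) (l : List (String × String)) (idx : Int) :
    pvResolve cd l idx
      = match l.find? (fun p => PySem.Str.pyGet? p.2 idx == some '1') with
        | some p => cd.getD p.1 ""
        | none => "-" := by
  induction l with
  | nil => rfl
  | cons p rest ih =>
    obtain ⟨key, mask⟩ := p
    by_cases hc : PySem.List.pyGet? mask.toList idx = some '1'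
    · simp [pvResolve, PySem.Str.pyGet?, hc]
    · simp [pvResolve, PySem.Str.pyGet?, hc, ih]

-- find? only depends on the predicate's values on the list.
lemma pv_find_congr {α : Type} (p q : α → Bool) (l : List α) (h : ∀ x ∈ l, p x = q x) :
    l.find? p = l.find? q := by
  induction l with
  | nil => rfl
  | cons x xs ih =>
    rw [List.find?_cons, List.find?_cons, h x (by simp)]
    split
    · rfl
    · exact ih (fun y hy => h y (by simp [hy]))

-- The two ports agree on every input (on inputs outside Pre_ the Python A raises instead).
lemma pv_main (curr_phases masks : List (String × String)) :
    get_phase_string_py curr_phases masks = get_phase_string_py_alt curr_phases masks := by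
  unfold get_phase_string_py get_phase_string_py_alt
  set cd := PySem.Dict.ofList curr_phases with hcd
  set md := PySem.Dict.ofList masks with hmd
  cases hitems : md.items with
  | nil =>
    have hv : md.values = [] := by simp [PySem.Dict.values, hitems]
    simp [hv, PySem.List.pyGet?]
  | cons p rest =>
    obtain ⟨k0, m0⟩ := p
    have hv : md.values = m0 :: rest.map Prod.snd := by simp [PySem.Dict.values, hitems]
    have hget : PySem.List.pyGet? md.values 0 = some m0 := by
      simp [hv, PySem.List.pyGet?, PySem.List.pyIdx?]
    simp only [hget]
    set n := m0.toList.length with hn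
    have hlen : PySem.Str.len m0 = (n : Int) := PySem.Str.len_eq m0
    rw [hlen]
    have hrange := PySem.List.pyRange_zero_natCast n
    rw [hrange]
    congr 1
    rw [pvCols_eq_map]
    apply List.ext_getElem?
    intro j
    simp only [List.foldl_map, List.map_map, Int.toNat_natCast]
    by_cases hj : j < n
    · rw [pv_outer (fun k i => PySem.Str.pyGet? (md.getD k "") (i : Int) == some '1')
        (fun k => cd.getD k "") n md.keys (List.replicate n "-")
        (by simp) j hj]
      have hrj : (List.range n)[j]? = some j := by simp [hj]
      rw [List.getElem?_map, hrj]
      simp only [Option.map_some, Function.comp]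
      -- relate A's find? over reversed KEYS to B's find? over reversed ITEMS
      have hkeys : md.keys = md.items.map Prod.fst := by simp [PySem.Dict.keys]
      have hnd : md.keys.Nodup := PySem.Dict.nodup_keys_ofList masks
      have hfind :
          md.keys.reverse.find? (fun k => PySem.Str.pyGet? (md.getD k "") ((j : Nat) : Int) == some '1')
            = (md.items.reverse.find? (fun q => PySem.Str.pyGet? q.2 ((j : Nat) : Int) == some '1')).map Prod.fst := by
        rw [hkeys, ← List.map_reverse, List.find?_map]
        congr 1
        apply pv_find_congr
        intro q hq
        obtain ⟨qk, qv⟩ := q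
        have hq' : (qk, qv) ∈ md.items := List.mem_reverse.mp hq
        have hgd : md.getD qk "" = qv := PySem.Dict.getD_of_mem_items md hq' hnd ""
        simp [Function.comp, hgd]
      rw [hfind, pvResolve_eq_find, hitems]
      cases hf : ((k0, m0) :: rest).reverse.find?
          (fun q => PySem.Str.pyGet? q.2 ((j : Nat) : Int) == some '1') with
      | none => simp [hj]
      | some q => simp
    · have h1 : (md.keys.foldl (fun a k => (List.range n).foldl
          (fun a (i : Nat) => if PySem.Str.pyGet? (md.getD k "") (i : Int) == some '1'
            then a.set i (cd.getD k "") else a) a) (List.replicate n "-"))[j]? = none := by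
        apply List.getElem?_eq_none
        rw [pv_len_outer]; simpa using Nat.le_of_not_lt hj
      rw [h1]
      symm
      apply List.getElem?_eq_none
      simpa using Nat.le_of_not_lt hj

-- ===== VERDICT (by name: the statement is the Claim_ definition above) =====
theorem get_phase_string_py_spec : Claim_equal_get_phase_string_py := by
  intro curr_phases masks _ _
  unfold Spec_get_phase_string_py
  exact pv_main curr_phases masks
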